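-- pv_equiv track=rewrite | github.com/Sur818/Coding-Projects | python programming/triplet sum less than k (On^3)2.py | triplet_sumgreaterthank
-- ===== SOURCE A (Python) =====
-- def triplet_sumgreaterthank(l,tar):
-- 	res=0
-- 	for i in range(len(l)-2):
-- 		for j in range(i+1,len(l)-1):
-- 			for k in range(j+1,len(l)):
-- 				if l[i]+l[j]+l[k]>tar:
--
-- 					res+=1
-- 	return res
-- ===== SOURCE B (Python) =====
-- def triplet_sumgreaterthank(l, tar):
--     a = sorted(l)
--     n = len(a)
--     res = 0
--     for i in range(n - 2):
--         t = tar - a[i]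
--         lo, hi = i + 1, n - 1
--         while lo < hi:
--             if a[lo] + a[hi] > t:
--                 res += hi - lo
--                 hi -= 1
--             else:
--                 lo += 1
--     return res
-- ===== Notes on version B (the rewrite author's own statement) =====
-- stated objective: faster
-- what changed: Replaces the O(n^3) triple nested index loop by sort-then-two-pointer: for each choice of the smallest index a two-pointer sweep counts the qualifying pairs in linear time.
import Mathlib
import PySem

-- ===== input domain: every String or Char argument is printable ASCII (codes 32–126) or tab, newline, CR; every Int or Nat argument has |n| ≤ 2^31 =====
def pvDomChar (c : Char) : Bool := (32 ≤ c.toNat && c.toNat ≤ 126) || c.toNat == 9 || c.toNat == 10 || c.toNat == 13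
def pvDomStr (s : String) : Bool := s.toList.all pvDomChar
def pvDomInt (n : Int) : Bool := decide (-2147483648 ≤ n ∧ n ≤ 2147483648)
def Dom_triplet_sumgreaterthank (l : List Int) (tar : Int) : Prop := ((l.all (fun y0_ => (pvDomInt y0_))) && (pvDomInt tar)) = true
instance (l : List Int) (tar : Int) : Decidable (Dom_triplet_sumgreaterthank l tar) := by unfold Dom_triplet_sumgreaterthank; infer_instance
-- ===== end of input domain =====

-- B replaces A's O(n^3) triple index loop by sort-then-two-pointer counting (objective: faster).

-- ===== PORT A =====
def triplet_sumgreaterthank (l : List Int) (tar : Int) : Int :=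
  (PySem.List.pyRange 0 (PySem.List.len l - 2) 1).foldl (fun res i =>
    (PySem.List.pyRange (i + 1) (PySem.List.len l - 1) 1).foldl (fun res j =>
      (PySem.List.pyRange (j + 1) (PySem.List.len l) 1).foldl (fun res k =>
        if PySem.List.pyGetD l i 0 + PySem.List.pyGetD l j 0 + PySem.List.pyGetD l k 0 > tar
        then res + 1 else res) res) res) 0

-- ===== PORT B =====
-- the 'while lo < hi' two-pointer loop of Source B
def pvTwoPtr (a : List Int) (t : Int) (lo hi res : Int) : Int :=
  if lo < hi then
    if PySem.List.pyGetD a lo 0 + PySem.List.pyGetD a hi 0 > t then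
      pvTwoPtr a t lo (hi - 1) (res + (hi - lo))
    else
      pvTwoPtr a t (lo + 1) hi res
  else res
termination_by (hi - lo).toNat
decreasing_by all_goals omega

def triplet_sumgreaterthank_alt (l : List Int) (tar : Int) : Int :=
  let a := PySem.List.sorted l (fun x => x) false
  (PySem.List.pyRange 0 (PySem.List.len a - 2) 1).foldl
    (fun res i => pvTwoPtr a (tar - PySem.List.pyGetD a i 0) (i + 1) (PySem.List.len a - 1) res) 0

-- ===== PRECONDITION & SPEC =====
def Spec_triplet_sumgreaterthank (l : List Int) (tar : Int) (out : Int) : Prop := out = triplet_sumgreaterthank_alt l tar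
instance (l : List Int) (tar : Int) (out : Int) : Decidable (Spec_triplet_sumgreaterthank l tar out) := by unfold Spec_triplet_sumgreaterthank; infer_instance

-- ===== CLAIM (what is proved, stated in full; the proofs are below) =====
def Claim_equal_triplet_sumgreaterthank : Prop := ∀ (l : List Int) (tar : Int), Dom_triplet_sumgreaterthank l tar → Spec_triplet_sumgreaterthank l tar (triplet_sumgreaterthank l tar)

-- ===== LEMMAS AND PROOFS =====

-- number of elements y of xs with t < y
def cnt1 (t : Int) (xs : List Int) : Nat := xs.countP (fun y => t < y)

-- number of index pairs j < k of xs with xs[j] + xs[k] > t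
def cnt2 : Int → List Int → Nat
  | _, [] => 0
  | t, x :: xs => cnt1 (t - x) xs + cnt2 t xs

-- number of index triples i < j < k of xs with xs[i] + xs[j] + xs[k] > tar
def cnt3 : Int → List Int → Nat
  | _, [] => 0
  | tar, x :: xs => cnt2 (tar - x) xs + cnt3 tar xs

lemma cnt2_zero {xs : List Int} (h : xs.length ≤ 1) (t : Int) : cnt2 t xs = 0 := by
  match xs, h with
  | [], _ => rfl
  | [x], _ => simp [cnt2, cnt1]

lemma cnt3_zero {xs : List Int} (h : xs.length ≤ 2) (tar : Int) : cnt3 tar xs = 0 := by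
  match xs, h with
  | [], _ => rfl
  | [x], _ => simp [cnt3, cnt2]
  | [x, y], _ => simp [cnt3, cnt2, cnt1]

lemma cnt1_perm {l₁ l₂ : List Int} (h : l₁.Perm l₂) (t : Int) : cnt1 t l₁ = cnt1 t l₂ :=
  h.countP_eq _

lemma cnt2_append_singleton (t y : Int) (s : List Int) :
    cnt2 t (s ++ [y]) = cnt2 t s + cnt1 (t - y) s := by
  induction s with
  | nil => simp [cnt2, cnt1]
  | cons x s ih =>
    simp only [List.cons_append, cnt2, cnt1, List.countP_append, List.countP_cons,
      List.countP_nil, ih]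
    have : (decide (t - x < y)) = (decide (t - y < x)) := by
      rcases Decidable.em (t - x < y) with h | h <;> simp_all <;> omega
    rw [this]; omega

lemma cnt2_perm {l₁ l₂ : List Int} (h : l₁.Perm l₂) (t : Int) : cnt2 t l₁ = cnt2 t l₂ := by
  induction h with
  | nil => rfl
  | cons x h ih => simp [cnt2, cnt1_perm h, ih]
  | swap x y l =>
    simp only [cnt2, cnt1, List.countP_cons]
    have : (decide (t - x < y)) = (decide (t - y < x)) := by
      rcases Decidable.em (t - x < y) with h | h <;> simp_all <;> omega
    rw [this]; omega
  | trans _ _ ih1 ih2 => exact ih1.trans ih2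

lemma cnt3_perm {l₁ l₂ : List Int} (h : l₁.Perm l₂) (tar : Int) : cnt3 tar l₁ = cnt3 tar l₂ := by
  induction h with
  | nil => rfl
  | cons x h ih => simp [cnt3, cnt2_perm h, ih]
  | swap x y l =>
    simp only [cnt3, cnt2, cnt1]
    have : (fun z : Int => decide (tar - x - y < z)) = (fun z : Int => decide (tar - y - x < z)) := by
      funext z; rcases Decidable.em (tar - x - y < z) with h | h <;> simp_all <;> omega
    rw [this]; omega
  | trans _ _ ih1 ih2 => exact ih1.trans ih2

-- pyGetD with a nonnegative index is getD at toNat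
lemma pyGetD_toNat (a : List Int) (i : Int) (hi : 0 ≤ i) :
    PySem.List.pyGetD a i 0 = a.getD i.toNat 0 := by
  simp [PySem.List.pyGetD, PySem.List.pyGet?_of_nonneg a hi, List.getD_eq_getElem?_getD]

-- every element of take k (drop m a) is some a.getD j 0, m ≤ j < m + k
lemma mem_seg {a : List Int} {m k : Nat} {x : Int} (hx : x ∈ (a.drop m).take k) :
    ∃ j : Nat, m ≤ j ∧ j < m + k ∧ j < a.length ∧ x = a.getD j 0 := by
  rw [List.mem_iff_getElem] at hx
  obtain ⟨i, hlt, hx⟩ := hx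
  have hi : i < k ∧ m + i < a.length := by
    simp [List.length_take, List.length_drop] at hlt; omega
  refine ⟨m + i, by omega, by omega, hi.2, ?_⟩
  rw [List.getD_eq_getElem _ _ hi.2, ← hx]
  simp [List.getElem_take, List.getElem_drop]

-- shared loop-sum lemma: the middle loop of A computes cnt2 on the tail
lemma midSum (n : Nat) : ∀ (x : List Int) (t : Int) (m : Int) (res : Int), 0 ≤ m →
    x.length ≤ m.toNat + n →
    (PySem.List.pyRange m ((x.length : Int) - 1) 1).foldl
      (fun res j => res + (cnt1 (t - PySem.List.pyGetD x j 0) (x.drop (j.toNat + 1)) : Int)) res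
    = res + cnt2 t (x.drop m.toNat) := by
  induction n with
  | zero =>
    intro x t m res hm hlen
    rw [PySem.List.pyRange_one_eq_nil (by omega)]
    rw [List.drop_eq_nil_of_le (by omega)]
    simp [cnt2]
  | succ n ih =>
    intro x t m res hm hlen
    by_cases h : (x.length : Int) - 1 ≤ m
    · rw [PySem.List.pyRange_one_eq_nil h]
      have h1 : (x.drop m.toNat).length ≤ 1 := by simp [List.length_drop]; omega
      simp [cnt2_zero h1]
    · have hmlt : m.toNat < x.length := by omega
      rw [PySem.List.pyRange_one_cons (by omega)]
      simp only [List.foldl_cons]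
      rw [ih x t (m + 1) _ (by omega) (by omega)]
      have hdrop : x.drop m.toNat = x.getD m.toNat 0 :: x.drop (m.toNat + 1) := by
        rw [List.getD_eq_getElem _ _ hmlt]; exact List.drop_eq_getElem_cons hmlt
      have ht : (m + 1).toNat = m.toNat + 1 := by omega
      rw [hdrop]
      simp only [cnt2, pyGetD_toNat x m hm, ht]
      push_cast; ring

-- shared loop-sum lemma: the outer loops of both programs compute cnt3
lemma outerSum (n : Nat) : ∀ (x : List Int) (tar : Int) (m : Int) (res : Int), 0 ≤ m →
    x.length ≤ m.toNat + n →
    (PySem.List.pyRange m ((x.length : Int) - 2) 1).foldl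
      (fun res i => res + (cnt2 (tar - PySem.List.pyGetD x i 0) (x.drop (i.toNat + 1)) : Int)) res
    = res + cnt3 tar (x.drop m.toNat) := by
  induction n with
  | zero =>
    intro x tar m res hm hlen
    rw [PySem.List.pyRange_one_eq_nil (by omega)]
    rw [List.drop_eq_nil_of_le (by omega)]
    simp [cnt3]
  | succ n ih =>
    intro x tar m res hm hlen
    by_cases h : (x.length : Int) - 2 ≤ m
    · rw [PySem.List.pyRange_one_eq_nil h]
      have h1 : (x.drop m.toNat).length ≤ 2 := by simp [List.length_drop]; omega
      simp [cnt3_zero h1]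
    · have hmlt : m.toNat < x.length := by omega
      rw [PySem.List.pyRange_one_cons (by omega)]
      simp only [List.foldl_cons]
      rw [ih x tar (m + 1) _ (by omega) (by omega)]
      have hdrop : x.drop m.toNat = x.getD m.toNat 0 :: x.drop (m.toNat + 1) := by
        rw [List.getD_eq_getElem _ _ hmlt]; exact List.drop_eq_getElem_cons hmlt
      have ht : (m + 1).toNat = m.toNat + 1 := by omega
      rw [hdrop]
      simp only [cnt3, pyGetD_toNat x m hm, ht]
      push_cast; ring

lemma A_eq (l : List Int) (tar : Int) : triplet_sumgreaterthank l tar = (cnt3 tar l : Int) := by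
  unfold triplet_sumgreaterthank
  simp only [PySem.List.len_eq]
  have hb : ∀ (res : Int), ∀ i ∈ PySem.List.pyRange 0 ((l.length : Int) - 2),
      (PySem.List.pyRange (i + 1) ((l.length : Int) - 1)).foldl (fun res j =>
        (PySem.List.pyRange (j + 1) (l.length : Int)).foldl (fun res k =>
          if PySem.List.pyGetD l i 0 + PySem.List.pyGetD l j 0 + PySem.List.pyGetD l k 0 > tar
          then res + 1 else res) res) res
      = res + (cnt2 (tar - PySem.List.pyGetD l i 0) (l.drop (i.toNat + 1)) : Int) := by
    intro res i hi
    have h0i : 0 ≤ i := (PySem.List.mem_pyRange_one.mp hi).1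
    have hbj : ∀ (res : Int), ∀ j ∈ PySem.List.pyRange (i + 1) ((l.length : Int) - 1),
        (PySem.List.pyRange (j + 1) (l.length : Int)).foldl (fun res k =>
          if PySem.List.pyGetD l i 0 + PySem.List.pyGetD l j 0 + PySem.List.pyGetD l k 0 > tar
          then res + 1 else res) res
        = res + (cnt1 (tar - PySem.List.pyGetD l i 0 - PySem.List.pyGetD l j 0) (l.drop (j.toNat + 1)) : Int) := by
      intro res j hj
      have h0j : 0 ≤ j := by have := (PySem.List.mem_pyRange_one.mp hj).1; omega
      have hfold := PySem.List.foldl_pyRange_pyGetD' l 0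
        (fun acc v => if PySem.List.pyGetD l i 0 + PySem.List.pyGetD l j 0 + v > tar then acc + 1 else acc)
        res (a := j + 1) (by omega)
      rw [hfold]
      rw [PySem.List.foldl_ite_add_one
        (fun v => PySem.List.pyGetD l i 0 + PySem.List.pyGetD l j 0 + v > tar)]
      have hjt : (j + 1).toNat = j.toNat + 1 := by omega
      rw [hjt]
      congr 1
      unfold cnt1
      apply congrArg
      apply List.countP_congr
      intro y _
      constructor <;> intro h <;> simp_all <;> omega
    rw [PySem.List.foldl_congr_mem _ _ _ _ hbj]
    have := midSum l.length l (tar - PySem.List.pyGetD l i 0) (i + 1) res (by omega) (by omega)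
    rw [this]
    have hit : (i + 1).toNat = i.toNat + 1 := by omega
    rw [hit]
  rw [PySem.List.foldl_congr_mem _ _ _ _ hb]
  have := outerSum l.length l tar 0 0 le_rfl (by omega)
  simpa using this

lemma twoPtr_eq (a : List Int)
    (hmono : ∀ p q : Nat, p ≤ q → q < a.length → a.getD p 0 ≤ a.getD q 0) (t : Int) :
    ∀ (n : Nat) (lo hi res : Int), 0 ≤ lo → hi < (a.length : Int) → (hi - lo).toNat ≤ n →
    pvTwoPtr a t lo hi res = res + cnt2 t ((a.drop lo.toNat).take (hi + 1 - lo).toNat) := by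
  intro n
  induction n with
  | zero =>
    intro lo hi res h0 hhi hn
    rw [pvTwoPtr, if_neg (by omega)]
    have h1 : ((a.drop lo.toNat).take (hi + 1 - lo).toNat).length ≤ 1 := by
      simp [List.length_take]; omega
    rw [cnt2_zero h1]; simp
  | succ n ih =>
    intro lo hi res h0 hhi hn
    by_cases hlh : lo < hi
    · have hglo := pyGetD_toNat a lo h0
      have hghi := pyGetD_toNat a hi (by omega)
      have hloN : lo.toNat < a.length := by omega
      have hhiN : hi.toNat < a.length := by omega
      rw [pvTwoPtr, if_pos hlh]
      by_cases hc : PySem.List.pyGetD a lo 0 + PySem.List.pyGetD a hi 0 > t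
      · rw [if_pos hc, ih lo (hi - 1) _ h0 (by omega) (by omega)]
        have hseg : (a.drop lo.toNat).take (hi + 1 - lo).toNat
            = (a.drop lo.toNat).take (hi - 1 + 1 - lo).toNat ++ [a.getD hi.toNat 0] := by
          have h1 : (hi + 1 - lo).toNat = (hi - lo).toNat + 1 := by omega
          have h2 : (hi - 1 + 1 - lo).toNat = (hi - lo).toNat := by omega
          rw [h1, h2, List.take_add_one]
          congr 1
          have h3 : (a.drop lo.toNat)[(hi - lo).toNat]? = some (a.getD hi.toNat 0) := by
            rw [List.getElem?_drop]
            have h4 : lo.toNat + (hi - lo).toNat = hi.toNat := by omega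
            rw [h4, List.getElem?_eq_getElem hhiN, List.getD_eq_getElem _ _ hhiN]
          rw [h3]; rfl
        rw [hseg, cnt2_append_singleton]
        have hc1 : cnt1 (t - a.getD hi.toNat 0) ((a.drop lo.toNat).take (hi - 1 + 1 - lo).toNat)
            = (hi - lo).toNat := by
          have hlen : ((a.drop lo.toNat).take (hi - 1 + 1 - lo).toNat).length = (hi - lo).toNat := by
            simp [List.length_take]; omega
          rw [← hlen]
          unfold cnt1
          rw [List.countP_eq_length]
          intro y hy
          obtain ⟨j, hj1, hj2, hj3, rfl⟩ := mem_seg hy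
          have hmj := hmono lo.toNat j (by omega) hj3
          rw [hglo, hghi] at hc
          simp only [decide_eq_true_eq]
          omega
        rw [hc1]
        push_cast
        omega
      · rw [if_neg hc, ih (lo + 1) hi _ (by omega) hhi (by omega)]
        have hseg : (a.drop lo.toNat).take (hi + 1 - lo).toNat
            = a.getD lo.toNat 0 :: (a.drop (lo + 1).toNat).take (hi + 1 - (lo + 1)).toNat := by
          have h1 : (hi + 1 - lo).toNat = (hi + 1 - (lo + 1)).toNat + 1 := by omega
          have h2 : (lo + 1).toNat = lo.toNat + 1 := by omega
          have hdrop : a.drop lo.toNat = a.getD lo.toNat 0 :: a.drop (lo.toNat + 1) := by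
            rw [List.getD_eq_getElem _ _ hloN]; exact List.drop_eq_getElem_cons hloN
          rw [h1, h2, hdrop, List.take_succ_cons]
        rw [hseg]
        simp only [cnt2]
        have hz : cnt1 (t - a.getD lo.toNat 0)
            ((a.drop (lo + 1).toNat).take (hi + 1 - (lo + 1)).toNat) = 0 := by
          unfold cnt1
          rw [List.countP_eq_zero]
          intro y hy
          obtain ⟨j, hj1, hj2, hj3, rfl⟩ := mem_seg hy
          have hmj := hmono j hi.toNat (by omega) hhiN
          rw [hglo, hghi] at hc
          simp only [decide_eq_true_eq]
          omega
        rw [hz]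
        simp
    · rw [pvTwoPtr, if_neg hlh]
      have h1 : ((a.drop lo.toNat).take (hi + 1 - lo).toNat).length ≤ 1 := by
        simp [List.length_take]; omega
      rw [cnt2_zero h1]; simp

lemma B_eq (l : List Int) (tar : Int) :
    triplet_sumgreaterthank_alt l tar = (cnt3 tar (PySem.List.sorted l (fun x => x) false) : Int) := by
  unfold triplet_sumgreaterthank_alt
  set a := PySem.List.sorted l (fun x => x) false with ha
  simp only [PySem.List.len_eq]
  have hmono : ∀ p q : Nat, p ≤ q → q < a.length → a.getD p 0 ≤ a.getD q 0 := by
    intro p q hpq hq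
    rw [List.getD_eq_getElem _ _ (by omega), List.getD_eq_getElem _ _ hq]
    exact PySem.List.sorted_id_getElem_mono l hpq hq
  have hb : ∀ (res : Int), ∀ i ∈ PySem.List.pyRange 0 ((a.length : Int) - 2),
      pvTwoPtr a (tar - PySem.List.pyGetD a i 0) (i + 1) ((a.length : Int) - 1) res
      = res + (cnt2 (tar - PySem.List.pyGetD a i 0) (a.drop (i.toNat + 1)) : Int) := by
    intro res i hi
    have h0i : 0 ≤ i := (PySem.List.mem_pyRange_one.mp hi).1
    have hi2 : i < (a.length : Int) - 2 := (PySem.List.mem_pyRange_one.mp hi).2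
    rw [twoPtr_eq a hmono _ a.length (i + 1) ((a.length : Int) - 1) res (by omega) (by omega) (by omega)]
    congr 2
    have h1 : (i + 1).toNat = i.toNat + 1 := by omega
    rw [h1, List.take_of_length_le]
    simp [List.length_drop]; omega
  rw [PySem.List.foldl_congr_mem _ _ _ _ hb]
  have := outerSum a.length a tar 0 0 le_rfl (by omega)
  simpa using this

-- ===== VERDICT (by name: the statement is the Claim_ definition above) =====
theorem triplet_sumgreaterthank_spec : Claim_equal_triplet_sumgreaterthank := by
  intro l tar _
  unfold Spec_triplet_sumgreaterthank
  rw [A_eq, B_eq, cnt3_perm (PySem.List.sorted_perm l (fun x => x) false).symm]
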